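-- pv_equiv track=rewrite | github.com/kunj290506/NakshaNirman | backend/services/multi_factor_engine.py | _interleave_beds_baths
-- ===== SOURCE A (Python) =====
-- from typing import Any, Dict, List, Optional, Tuple
--
-- def _interleave_beds_baths(rooms: List[Dict]) -> List[Dict]:
--     """Order: master_bedroom, bath, bedroom, bath, ... then others."""
--     beds = [r for r in rooms if r["room_type"] in ("master_bedroom", "bedroom")]
--     baths = [r for r in rooms if r["room_type"] in ("bathroom", "toilet")]
--     others = [r for r in rooms
--               if r["room_type"] not in ("master_bedroom", "bedroom", "bathroom", "toilet")]
--
--     # Master first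
--     beds.sort(key=lambda r: 0 if r["room_type"] == "master_bedroom" else 1)
--
--     result: List[Dict] = []
--     bi = 0
--     for bed in beds:
--         result.append(bed)
--         if bi < len(baths):
--             result.append(baths[bi])
--             bi += 1
--     while bi < len(baths):
--         result.append(baths[bi])
--         bi += 1
--     result.extend(others)
--     return result
-- ===== SOURCE B (Python) =====
-- def _interleave_beds_baths(rooms):
--     """Order: master_bedroom, bath, bedroom, bath, ... then others.
--
--     Direct addressing: compute each room's final slot arithmetically and
--     write it straight into a preallocated output list -- no sort, no
--     partition lists, no interleaving loop.
--     """
--     n_master = sum(1 for r in rooms if r["room_type"] == "master_bedroom")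
--     n_beds = n_master + sum(1 for r in rooms if r["room_type"] == "bedroom")
--     n_baths = sum(1 for r in rooms if r["room_type"] in ("bathroom", "toilet"))
--     n = min(n_beds, n_baths)
--     out = [None] * len(rooms)
--     mi = bi = ti = oi = 0
--     for r in rooms:
--         t = r["room_type"]
--         if t == "master_bedroom":
--             out[2 * mi if mi < n else n + mi] = r
--             mi += 1
--         elif t == "bedroom":
--             i = n_master + bi
--             out[2 * i if i < n else n + i] = r
--             bi += 1
--         elif t in ("bathroom", "toilet"):
--             out[2 * ti + 1 if ti < n else n_beds + ti] = r
--             ti += 1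
--         else:
--             out[n_beds + n_baths + oi] = r
--             oi += 1
--     return out
-- ===== Notes on version B (the rewrite author's own statement) =====
-- stated objective: alternative
-- what changed: B uses direct addressing instead of A's partition-sort-interleave: it counts the categories, computes each room's final slot index arithmetically in one pass, and writes each room straight into a preallocated output list; A builds partition lists, stably sorts the beds on a 0/1 key and interleaves them with a manual bath-index pointer loop.
import Mathlib
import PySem

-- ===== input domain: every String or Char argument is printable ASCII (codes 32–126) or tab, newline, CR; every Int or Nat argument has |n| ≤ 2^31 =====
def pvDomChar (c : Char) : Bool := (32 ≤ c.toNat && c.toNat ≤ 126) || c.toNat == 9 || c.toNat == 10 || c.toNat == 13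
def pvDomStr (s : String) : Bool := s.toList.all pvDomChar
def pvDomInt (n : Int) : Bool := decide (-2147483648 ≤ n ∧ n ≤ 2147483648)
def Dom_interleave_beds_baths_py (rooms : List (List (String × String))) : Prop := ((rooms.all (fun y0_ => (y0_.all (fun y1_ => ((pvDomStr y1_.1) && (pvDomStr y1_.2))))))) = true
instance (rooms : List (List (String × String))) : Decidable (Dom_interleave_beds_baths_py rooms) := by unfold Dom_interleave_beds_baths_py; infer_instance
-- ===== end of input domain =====

-- B replaces A's partition + sort + interleaving loop by direct addressing: it counts the
-- categories, computes each room's final slot arithmetically and writes the room straight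
-- into a preallocated output list (objective: alternative).

abbrev pvRoom : Type := List (String × String)

-- r["room_type"] — first-match dict lookup; under Pre_ the key is present, so getD "" is exact.
def pyRoomType (r : pvRoom) : String :=
  ((PySem.Dict.mk r).get? "room_type").getD ""

-- ===== PORT A =====
-- while bi < len(baths): result.append(baths[bi]); bi += 1
def pyDrainBaths (baths : List pvRoom) (res : List pvRoom) (bi : Nat) : List pvRoom :=
  if h : bi < baths.length then pyDrainBaths baths (res ++ [baths[bi]]) (bi + 1) else res
termination_by baths.length - bi

def interleave_beds_baths_py (rooms : List (List (String × String))) : List (List (String × String)) :=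
  let beds := rooms.filter (fun r => pyRoomType r == "master_bedroom" || pyRoomType r == "bedroom")
  let baths := rooms.filter (fun r => pyRoomType r == "bathroom" || pyRoomType r == "toilet")
  let others := rooms.filter (fun r =>
    !(pyRoomType r == "master_bedroom" || pyRoomType r == "bedroom" ||
      pyRoomType r == "bathroom" || pyRoomType r == "toilet"))
  -- beds.sort(key=lambda r: 0 if r["room_type"] == "master_bedroom" else 1)
  let beds := PySem.List.sorted beds (fun r => if pyRoomType r == "master_bedroom" then (0 : Int) else 1)
  -- for bed in beds: append bed; if bi < len(baths): append baths[bi]; bi += 1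
  -- (bi : Nat stays ≥ 0 and, inside the branch, < len baths, so getD is exactly Python's baths[bi])
  let st := beds.foldl (fun (st : List pvRoom × Nat) bed =>
      let res := st.1 ++ [bed]
      if st.2 < baths.length then (res ++ [baths.getD st.2 []], st.2 + 1) else (res, st.2))
    ([], 0)
  pyDrainBaths baths st.1 st.2 ++ others

-- ===== PORT B =====
-- the body of B's `for r in rooms:` loop; state = (out, mi, bi, ti, oi)
def bStep (nMaster nBeds nBaths n : Nat)
    (st : List (Option pvRoom) × Nat × Nat × Nat × Nat) (r : pvRoom) :
    List (Option pvRoom) × Nat × Nat × Nat × Nat :=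
  let (out, mi, bi, ti, oi) := st
  let t := pyRoomType r
  if t == "master_bedroom" then
    (out.set (if mi < n then 2 * mi else n + mi) (some r), mi + 1, bi, ti, oi)
  else if t == "bedroom" then
    let i := nMaster + bi
    (out.set (if i < n then 2 * i else n + i) (some r), mi, bi + 1, ti, oi)
  else if t == "bathroom" || t == "toilet" then
    (out.set (if ti < n then 2 * ti + 1 else nBeds + ti) (some r), mi, bi, ti + 1, oi)
  else
    (out.set (nBeds + nBaths + oi) (some r), mi, bi, ti, oi + 1)

def interleave_beds_baths_py_alt (rooms : List (List (String × String))) : List (List (String × String)) :=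
  let nMaster := rooms.countP (fun r => pyRoomType r == "master_bedroom")
  let nBeds := nMaster + rooms.countP (fun r => pyRoomType r == "bedroom")
  let nBaths := rooms.countP (fun r => pyRoomType r == "bathroom" || pyRoomType r == "toilet")
  let n := min nBeds nBaths
  let st := rooms.foldl (bStep nMaster nBeds nBaths n)
    (List.replicate rooms.length none, 0, 0, 0, 0)
  -- the slots form a bijection onto 0..len-1, so every slot is written; getD [] is exact
  st.1.map (fun o => o.getD [])

-- ===== PRECONDITION & SPEC =====
-- Pre_ excludes only rooms missing the "room_type" key, on which A (and B) raise KeyError.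
def Pre_interleave_beds_baths_py (rooms : List (List (String × String))) : Prop :=
  ∀ r ∈ rooms, "room_type" ∈ r.map Prod.fst
instance (rooms : List (List (String × String))) : Decidable (Pre_interleave_beds_baths_py rooms) := by unfold Pre_interleave_beds_baths_py; infer_instance

def pvWitness_interleave_beds_baths_py : (List (List (String × String))) :=
  [[("room_type", "bedroom")], [("room_type", "bathroom")], [("room_type", "master_bedroom")],
   [("room_type", "kitchen")], [("room_type", "toilet")]]

def Spec_interleave_beds_baths_py (rooms : List (List (String × String))) (out : List (List (String × String))) : Prop := out = interleave_beds_baths_py_alt rooms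
instance (rooms : List (List (String × String))) (out : List (List (String × String))) : Decidable (Spec_interleave_beds_baths_py rooms out) := by unfold Spec_interleave_beds_baths_py; infer_instance

-- ===== CLAIM (what is proved, stated in full; the proofs are below) =====
def Claim_equal_interleave_beds_baths_py : Prop := ∀ (rooms : List (List (String × String))), Dom_interleave_beds_baths_py rooms → Pre_interleave_beds_baths_py rooms → Spec_interleave_beds_baths_py rooms (interleave_beds_baths_py rooms)

-- ===== LEMMAS AND PROOFS =====

-- category predicates
def isM (r : pvRoom) : Bool := pyRoomType r == "master_bedroom"
def isB (r : pvRoom) : Bool := pyRoomType r == "bedroom"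
def isT (r : pvRoom) : Bool := pyRoomType r == "bathroom" || pyRoomType r == "toilet"
def isO (r : pvRoom) : Bool := !(isM r || isB r || isT r)

-- A's interleave pattern, named for the loop invariant.
def bWeave (beds baths : List pvRoom) : List pvRoom :=
  (beds.zip baths).flatMap (fun p => [p.1, p.2]) ++
    beds.drop (min beds.length baths.length) ++ baths.drop (min beds.length baths.length)

theorem bWeave_nil (baths : List pvRoom) : bWeave [] baths = baths := by
  simp [bWeave]

theorem bWeave_nil_right (bs : List pvRoom) : bWeave bs [] = bs := by
  cases bs <;> simp [bWeave]

theorem bWeave_cons_cons (b c : pvRoom) (bs cs : List pvRoom) :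
    bWeave (b :: bs) (c :: cs) = b :: c :: bWeave bs cs := by
  simp [bWeave, Nat.succ_min_succ]

theorem pyDrainBaths_eq (baths : List pvRoom) :
    ∀ bi res, pyDrainBaths baths res bi = res ++ baths.drop bi := by
  intro bi
  induction' h : baths.length - bi using Nat.strong_induction_on with n ih generalizing bi
  intro res
  rw [pyDrainBaths]
  split_ifs with hlt
  · subst h
    rw [ih (baths.length - (bi + 1)) (by omega) (bi + 1) rfl]
    rw [List.drop_eq_getElem_cons hlt]
    simp
  · rw [List.drop_of_length_le (by omega)]
    simp

theorem loop_invariant (baths : List pvRoom) :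
    ∀ (beds : List pvRoom) (bi : Nat) (acc : List pvRoom),
      bi ≤ baths.length →
      (let st := beds.foldl (fun (st : List pvRoom × Nat) bed =>
          let res := st.1 ++ [bed]
          if st.2 < baths.length then (res ++ [baths.getD st.2 []], st.2 + 1) else (res, st.2))
        (acc, bi)
       pyDrainBaths baths st.1 st.2) = acc ++ bWeave beds (baths.drop bi) := by
  intro beds
  induction beds with
  | nil =>
    intro bi acc _
    simp only [List.foldl_nil]
    rw [pyDrainBaths_eq, bWeave_nil]
  | cons b rest ih =>
    intro bi acc hbi
    simp only [List.foldl_cons]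
    by_cases hlt : bi < baths.length
    · simp only [if_pos hlt]
      rw [ih (bi + 1) _ (by omega)]
      rw [List.drop_eq_getElem_cons hlt, bWeave_cons_cons]
      simp [List.getD, List.getElem?_eq_getElem hlt]
    · simp only [if_neg hlt]
      rw [ih bi _ hbi, List.drop_of_length_le (by omega), bWeave_nil_right, bWeave_nil_right]
      simp

theorem insertBy_append_left {α : Type} (before : α → α → Bool) (x : α) (as bs : List α)
    (h : ∀ a ∈ as, before x a = false) :
    PySem.List.insertBy before x (as ++ bs) = as ++ PySem.List.insertBy before x bs := by
  induction as with
  | nil => simp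
  | cons a as ih =>
    have ha : before x a = false := h a (by simp)
    simp only [List.cons_append, PySem.List.insertBy, ha]
    simp only [Bool.false_eq_true, if_false]
    rw [ih (fun a' ha' => h a' (by simp [ha']))]

theorem sorted_two_key (P : pvRoom → Bool) (xs : List pvRoom) :
    PySem.List.sorted xs (fun r => if P r then (0 : Int) else 1) =
      xs.filter P ++ xs.filter (fun r => !P r) := by
  rw [PySem.List.sorted_eq_foldl_insertBy]
  have aux : ∀ (l : List pvRoom) (as bs : List pvRoom),
      (∀ a ∈ as, P a = true) → (∀ b ∈ bs, P b = false) →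
      l.foldl (fun acc x =>
          PySem.List.insertBy (fun a b =>
            decide ((if P a then (0 : Int) else 1) < (if P b then (0 : Int) else 1))) x acc)
        (as ++ bs)
      = (as ++ l.filter P) ++ (bs ++ l.filter (fun r => !P r)) := by
    intro l
    induction l with
    | nil => intro as bs _ _; simp
    | cons x xs ih =>
      intro as bs has hbs
      simp only [List.foldl_cons]
      by_cases hP : P x = true
      · have h1 : PySem.List.insertBy (fun a b =>
            decide ((if P a then (0 : Int) else 1) < (if P b then (0 : Int) else 1))) x (as ++ bs)
            = (as ++ [x]) ++ bs := by
          rw [insertBy_append_left _ _ _ _ (fun a ha => by simp [hP, has a ha])]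
          cases bs with
          | nil => simp [PySem.List.insertBy]
          | cons c cs =>
            have hc : P c = false := hbs c (by simp)
            simp [PySem.List.insertBy, hP, hc]
        have has' : ∀ a ∈ as ++ [x], P a = true := by
          intro a ha
          rcases List.mem_append.1 ha with h | h
          · exact has a h
          · simp only [List.mem_singleton] at h; subst h; exact hP
        rw [h1, ih (as ++ [x]) bs has' hbs]
        simp [hP]
      · have h1 : PySem.List.insertBy (fun a b =>
            decide ((if P a then (0 : Int) else 1) < (if P b then (0 : Int) else 1))) x (as ++ bs)
            = as ++ (bs ++ [x]) := by
          rw [PySem.List.insertBy_of_forall_not_before _ _ _ (by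
            intro y _
            rw [if_neg hP]
            split <;> simp)]
          simp
        have hbs' : ∀ b ∈ bs ++ [x], P b = false := by
          intro b hb
          rcases List.mem_append.1 hb with h | h
          · exact hbs b h
          · simp only [List.mem_singleton] at h; subst h; exact Bool.not_eq_true _ ▸ eq_false_of_ne_true hP
        rw [h1, ih as (bs ++ [x]) has hbs']
        simp [hP]
  have h := aux xs [] [] (by simp) (by simp)
  simpa using h

theorem filter_master (rooms : List pvRoom) :
    (rooms.filter (fun r => pyRoomType r == "master_bedroom" || pyRoomType r == "bedroom")).filter
        (fun r => pyRoomType r == "master_bedroom")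
      = rooms.filter (fun r => pyRoomType r == "master_bedroom") := by
  rw [List.filter_filter]
  apply List.filter_congr
  intro r _
  by_cases h : pyRoomType r = "master_bedroom"
  · simp [h]
  · have hf : (pyRoomType r == "master_bedroom") = false := beq_eq_false_iff_ne.2 h
    rw [hf]; simp

theorem filter_bedroom (rooms : List pvRoom) :
    (rooms.filter (fun r => pyRoomType r == "master_bedroom" || pyRoomType r == "bedroom")).filter
        (fun r => !(pyRoomType r == "master_bedroom"))
      = rooms.filter (fun r => pyRoomType r == "bedroom") := by
  rw [List.filter_filter]
  apply List.filter_congr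
  intro r _
  by_cases h : pyRoomType r = "master_bedroom"
  · simp [h]
  · have hf : (pyRoomType r == "master_bedroom") = false := beq_eq_false_iff_ne.2 h
    rw [hf]; simp

-- ===================== B-side machinery =====================

theorem isM_def : (fun r : pvRoom => pyRoomType r == "master_bedroom") = isM := rfl
theorem isB_def : (fun r : pvRoom => pyRoomType r == "bedroom") = isB := rfl
theorem isT_def : (fun r : pvRoom => pyRoomType r == "bathroom" || pyRoomType r == "toilet") = isT := rfl
theorem isO_def : (fun r : pvRoom =>
    !(pyRoomType r == "master_bedroom" || pyRoomType r == "bedroom" ||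
      pyRoomType r == "bathroom" || pyRoomType r == "toilet")) = isO := by
  funext r; simp [isO, isM, isB, isT, Bool.or_assoc]

-- A's port equals the named weave of its partitions.
theorem portA_eq_weave (rooms : List pvRoom) :
    interleave_beds_baths_py rooms =
      bWeave (rooms.filter isM ++ rooms.filter isB) (rooms.filter isT) ++
        rooms.filter isO := by
  unfold interleave_beds_baths_py
  simp only []
  rw [sorted_two_key, filter_master, filter_bedroom]
  have h := loop_invariant (rooms.filter (fun r => pyRoomType r == "bathroom" || pyRoomType r == "toilet"))
    (rooms.filter (fun r => pyRoomType r == "master_bedroom") ++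
      rooms.filter (fun r => pyRoomType r == "bedroom")) 0 [] (Nat.zero_le _)
  simp only [List.drop_zero, List.nil_append] at h
  rw [h, isO_def]
  rfl

-- the final arrangement both programs produce
def Tgt (rooms : List pvRoom) : List pvRoom :=
  bWeave (rooms.filter isM ++ rooms.filter isB) (rooms.filter isT) ++ rooms.filter isO

-- each room lands in exactly one category
theorem cat_cases (r : pvRoom) :
    (isM r ∧ ¬isB r ∧ ¬isT r ∧ ¬isO r) ∨ (¬isM r ∧ isB r ∧ ¬isT r ∧ ¬isO r) ∨
    (¬isM r ∧ ¬isB r ∧ isT r ∧ ¬isO r) ∨ (¬isM r ∧ ¬isB r ∧ ¬isT r ∧ isO r) := by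
  simp only [isO, isM, isB, isT] at *
  by_cases h : pyRoomType r = "master_bedroom" <;>
    by_cases h2 : pyRoomType r = "bedroom" <;>
    by_cases h3 : pyRoomType r = "bathroom" <;>
    by_cases h4 : pyRoomType r = "toilet" <;>
    simp_all

theorem length_partition (rooms : List pvRoom) :
    rooms.length = (rooms.filter isM).length + (rooms.filter isB).length +
      (rooms.filter isT).length + (rooms.filter isO).length := by
  induction rooms with
  | nil => rfl
  | cons r rs ih =>
    rcases cat_cases r with ⟨h1, h2, h3, h4⟩ | ⟨h1, h2, h3, h4⟩ | ⟨h1, h2, h3, h4⟩ | ⟨h1, h2, h3, h4⟩ <;>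
      simp_all <;> omega

-- scatter a list of (slot, room) writes over an initial buffer
def scatter (ps : List (Nat × pvRoom)) (init : List (Option pvRoom)) : List (Option pvRoom) :=
  ps.foldl (fun o pr => o.set pr.1 (some pr.2)) init

-- the (slot, room) pairs B's loop writes, as an explicit list
def placed (nMaster nBeds nBaths n : Nat) :
    List pvRoom → Nat → Nat → Nat → Nat → List (Nat × pvRoom)
  | [], _, _, _, _ => []
  | r :: rs, mi, bi, ti, oi =>
    if isM r then
      ((if mi < n then 2 * mi else n + mi), r) :: placed nMaster nBeds nBaths n rs (mi + 1) bi ti oi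
    else if isB r then
      ((if nMaster + bi < n then 2 * (nMaster + bi) else n + (nMaster + bi)), r) ::
        placed nMaster nBeds nBaths n rs mi (bi + 1) ti oi
    else if isT r then
      ((if ti < n then 2 * ti + 1 else nBeds + ti), r) :: placed nMaster nBeds nBaths n rs mi bi (ti + 1) oi
    else
      ((nBeds + nBaths + oi), r) :: placed nMaster nBeds nBaths n rs mi bi ti (oi + 1)

theorem fold_eq_scatter (nM nBd nBt n : Nat) (rooms : List pvRoom) :
    ∀ out mi bi ti oi,
      (rooms.foldl (bStep nM nBd nBt n) (out, mi, bi, ti, oi)).1 =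
        scatter (placed nM nBd nBt n rooms mi bi ti oi) out := by
  induction rooms with
  | nil => intro out mi bi ti oi; simp [scatter, placed]
  | cons r rs ih =>
    intro out mi bi ti oi
    simp only [List.foldl_cons, placed, bStep]
    by_cases h1 : isM r
    · simp only [isM] at h1
      simp only [isM, h1, if_pos]
      simp [scatter, ih]
    · have h1' : (pyRoomType r == "master_bedroom") = false := by
        simpa [isM] using h1
      simp only [isM, h1', Bool.false_eq_true, if_false]
      by_cases h2 : isB r
      · simp only [isB] at h2
        simp only [isB, h2, if_pos]
        simp [scatter, ih]
      · have h2' : (pyRoomType r == "bedroom") = false := by simpa [isB] using h2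
        simp only [isB, h2', Bool.false_eq_true, if_false]
        by_cases h3 : isT r
        · simp only [isT] at h3
          simp only [isT, h3, if_pos]
          simp [scatter, ih]
        · have h3' : (pyRoomType r == "bathroom" || pyRoomType r == "toilet") = false := by
            simpa [isT] using h3
          simp only [isT, h3', Bool.false_eq_true, if_false]
          simp [scatter, ih]

theorem placed_length (nM nBd nBt n : Nat) (rooms : List pvRoom) :
    ∀ mi bi ti oi, (placed nM nBd nBt n rooms mi bi ti oi).length = rooms.length := by
  induction rooms with
  | nil => intro _ _ _ _; simp [placed]
  | cons r rs ih =>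
    intro mi bi ti oi
    simp only [placed]
    split_ifs <;> simp [ih]

theorem scatter_length (ps : List (Nat × pvRoom)) :
    ∀ init, (scatter ps init).length = init.length := by
  induction ps with
  | nil => intro init; rfl
  | cons p ps ih =>
    intro init
    simp only [scatter, List.foldl_cons]
    rw [← scatter, ih]
    simp

theorem scatter_get_not_mem (ps : List (Nat × pvRoom)) (q : Nat) :
    ∀ init, q ∉ ps.map Prod.fst → (scatter ps init)[q]? = init[q]? := by
  induction ps with
  | nil => intro init _; rfl
  | cons p ps ih =>
    intro init h
    simp only [List.map_cons, List.mem_cons] at h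
    push Not at h
    simp only [scatter, List.foldl_cons]
    rw [← scatter, ih _ h.2, List.getElem?_set_ne (fun hq => h.1 hq.symm)]

theorem scatter_get_mem (ps : List (Nat × pvRoom)) (q : Nat) (v : pvRoom) :
    ∀ init, (q, v) ∈ ps → (ps.map Prod.fst).Nodup → q < init.length →
      (scatter ps init)[q]? = some (some v) := by
  induction ps with
  | nil => intro init hmem _ _; simp at hmem
  | cons p ps ih =>
    intro init hmem hnd hq
    simp only [List.map_cons, List.nodup_cons] at hnd
    simp only [scatter, List.foldl_cons]
    rw [← scatter]
    rcases List.mem_cons.1 hmem with h | h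
    · subst h
      rw [scatter_get_not_mem _ _ _ hnd.1]
      exact List.getElem?_set_self (by simpa using hq)
    · exact ih _ h hnd.2 (by simpa using hq)

-- membership of each category's k-th room in `placed`
theorem mem_placed_master (nM nBd nBt n : Nat) (rooms : List pvRoom) :
    ∀ mi bi ti oi k v, (rooms.filter isM)[k]? = some v →
      ((if mi + k < n then 2 * (mi + k) else n + (mi + k)), v) ∈
        placed nM nBd nBt n rooms mi bi ti oi := by
  induction rooms with
  | nil => intro _ _ _ _ k v hk; simp at hk
  | cons r rs ih =>
    intro mi bi ti oi k v hk
    by_cases h1 : isM r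
    · rw [List.filter_cons_of_pos h1] at hk
      simp only [placed, if_pos h1]
      cases k with
      | zero => simp at hk; subst hk; simp
      | succ k =>
        refine List.mem_cons_of_mem _ ?_
        rw [List.getElem?_cons_succ] at hk
        have h := ih (mi + 1) bi ti oi k v hk
        simpa [show mi + 1 + k = mi + (k + 1) from by omega] using h
    · rw [List.filter_cons_of_neg (by simpa using h1)] at hk
      simp only [placed, if_neg h1]
      by_cases hb : isB r
      · simp only [if_pos hb]; exact List.mem_cons_of_mem _ (ih _ _ _ _ k v hk)
      · simp only [if_neg hb]
        by_cases hc : isT r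
        · simp only [if_pos hc]; exact List.mem_cons_of_mem _ (ih _ _ _ _ k v hk)
        · simp only [if_neg hc]; exact List.mem_cons_of_mem _ (ih _ _ _ _ k v hk)

theorem mem_placed_bedroom (nM nBd nBt n : Nat) (rooms : List pvRoom) :
    ∀ mi bi ti oi k v, (rooms.filter isB)[k]? = some v →
      ((if nM + (bi + k) < n then 2 * (nM + (bi + k)) else n + (nM + (bi + k))), v) ∈
        placed nM nBd nBt n rooms mi bi ti oi := by
  induction rooms with
  | nil => intro _ _ _ _ k v hk; simp at hk
  | cons r rs ih =>
    intro mi bi ti oi k v hk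
    by_cases h2 : isB r
    · have h1 : ¬ isM r := by
        rcases cat_cases r with ⟨a,b,_,_⟩|⟨a,_,_,_⟩|⟨_,b,_,_⟩|⟨_,b,_,_⟩ <;> simp_all
      rw [List.filter_cons_of_pos h2] at hk
      simp only [placed, if_neg h1, if_pos h2]
      cases k with
      | zero => simp at hk; subst hk; simp
      | succ k =>
        refine List.mem_cons_of_mem _ ?_
        rw [List.getElem?_cons_succ] at hk
        have h := ih mi (bi + 1) ti oi k v hk
        simpa [show bi + 1 + k = bi + (k + 1) from by omega] using h
    · rw [List.filter_cons_of_neg (by simpa using h2)] at hk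
      simp only [placed, if_neg h2]
      by_cases ha : isM r
      · simp only [if_pos ha]; exact List.mem_cons_of_mem _ (ih _ _ _ _ k v hk)
      · simp only [if_neg ha]
        by_cases hc : isT r
        · simp only [if_pos hc]; exact List.mem_cons_of_mem _ (ih _ _ _ _ k v hk)
        · simp only [if_neg hc]; exact List.mem_cons_of_mem _ (ih _ _ _ _ k v hk)

theorem mem_placed_bath (nM nBd nBt n : Nat) (rooms : List pvRoom) :
    ∀ mi bi ti oi k v, (rooms.filter isT)[k]? = some v →
      ((if ti + k < n then 2 * (ti + k) + 1 else nBd + (ti + k)), v) ∈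
        placed nM nBd nBt n rooms mi bi ti oi := by
  induction rooms with
  | nil => intro _ _ _ _ k v hk; simp at hk
  | cons r rs ih =>
    intro mi bi ti oi k v hk
    by_cases h3 : isT r
    · have h1 : ¬ isM r := by
        rcases cat_cases r with ⟨a,_,c,_⟩|⟨_,_,c,_⟩|⟨a,_,_,_⟩|⟨_,_,c,_⟩ <;> simp_all
      have h2 : ¬ isB r := by
        rcases cat_cases r with ⟨_,b,c,_⟩|⟨_,b,c,_⟩|⟨_,b,_,_⟩|⟨_,_,c,_⟩ <;> simp_all
      rw [List.filter_cons_of_pos h3] at hk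
      simp only [placed, if_neg h1, if_neg h2, if_pos h3]
      cases k with
      | zero => simp at hk; subst hk; simp
      | succ k =>
        refine List.mem_cons_of_mem _ ?_
        rw [List.getElem?_cons_succ] at hk
        have h := ih mi bi (ti + 1) oi k v hk
        simpa [show ti + 1 + k = ti + (k + 1) from by omega] using h
    · rw [List.filter_cons_of_neg (by simpa using h3)] at hk
      simp only [placed, if_neg h3]
      by_cases ha : isM r
      · simp only [if_pos ha]; exact List.mem_cons_of_mem _ (ih _ _ _ _ k v hk)
      · simp only [if_neg ha]
        by_cases hb : isB r
        · simp only [if_pos hb]; exact List.mem_cons_of_mem _ (ih _ _ _ _ k v hk)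
        · simp only [if_neg hb]; exact List.mem_cons_of_mem _ (ih _ _ _ _ k v hk)

theorem mem_placed_other (nM nBd nBt n : Nat) (rooms : List pvRoom) :
    ∀ mi bi ti oi k v, (rooms.filter isO)[k]? = some v →
      ((nBd + nBt + (oi + k)), v) ∈ placed nM nBd nBt n rooms mi bi ti oi := by
  induction rooms with
  | nil => intro _ _ _ _ k v hk; simp at hk
  | cons r rs ih =>
    intro mi bi ti oi k v hk
    by_cases h4 : isO r
    · have h1 : ¬ isM r := by
        rcases cat_cases r with ⟨a,_,_,d⟩|⟨a,_,_,_⟩|⟨a,_,_,_⟩|⟨a,_,_,_⟩ <;> simp_all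
      have h2 : ¬ isB r := by
        rcases cat_cases r with ⟨_,b,_,d⟩|⟨_,b,_,d⟩|⟨_,b,_,_⟩|⟨_,b,_,_⟩ <;> simp_all
      have h3 : ¬ isT r := by
        rcases cat_cases r with ⟨_,_,c,d⟩|⟨_,_,c,d⟩|⟨_,_,c,d⟩|⟨_,_,c,_⟩ <;> simp_all
      rw [List.filter_cons_of_pos h4] at hk
      simp only [placed, if_neg h1, if_neg h2, if_neg h3]
      cases k with
      | zero => simp at hk; subst hk; simp
      | succ k =>
        refine List.mem_cons_of_mem _ ?_
        rw [List.getElem?_cons_succ] at hk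
        have h := ih mi bi ti (oi + 1) k v hk
        simpa [show oi + 1 + k = oi + (k + 1) from by omega] using h
    · rw [List.filter_cons_of_neg (by simpa using h4)] at hk
      have hcat : isM r ∨ isB r ∨ isT r := by
        rcases cat_cases r with ⟨a,_,_,_⟩|⟨_,b,_,_⟩|⟨_,_,c,_⟩|⟨_,_,_,d⟩
        · exact Or.inl a
        · exact Or.inr (Or.inl b)
        · exact Or.inr (Or.inr c)
        · exact absurd d h4
      simp only [placed]
      by_cases ha : isM r
      · simp only [if_pos ha]; exact List.mem_cons_of_mem _ (ih _ _ _ _ k v hk)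
      · simp only [if_neg ha]
        by_cases hb : isB r
        · simp only [if_pos hb]; exact List.mem_cons_of_mem _ (ih _ _ _ _ k v hk)
        · simp only [if_neg hb]
          by_cases hc : isT r
          · simp only [if_pos hc]; exact List.mem_cons_of_mem _ (ih _ _ _ _ k v hk)
          · rcases hcat with h | h | h
            · exact absurd h ha
            · exact absurd h hb
            · exact absurd h hc

-- getElem? characterisation of bWeave
theorem bWeave_length (bs : List pvRoom) : ∀ ts, (bWeave bs ts).length = bs.length + ts.length := by
  induction bs with
  | nil => intro ts; simp [bWeave_nil]
  | cons b bs ih =>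
    intro ts
    cases ts with
    | nil => simp [bWeave_nil_right]
    | cons t ts =>
      rw [bWeave_cons_cons]
      simp only [List.length_cons, ih]
      omega

theorem bWeave_get_even (i : Nat) :
    ∀ (bs ts : List pvRoom), i < bs.length → i < ts.length → (bWeave bs ts)[2 * i]? = bs[i]? := by
  induction i with
  | zero =>
    intro bs ts hb ht
    cases bs with
    | nil => simp at hb
    | cons b bs =>
      cases ts with
      | nil => simp at ht
      | cons t ts => rw [bWeave_cons_cons]; simp
  | succ i ih =>
    intro bs ts hb ht
    cases bs with
    | nil => simp at hb
    | cons b bs =>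
      cases ts with
      | nil => simp at ht
      | cons t ts =>
        rw [bWeave_cons_cons, show 2 * (i + 1) = 2 * i + 1 + 1 from by omega]
        simp only [List.getElem?_cons_succ]
        exact ih bs ts (by simpa using hb) (by simpa using ht)

theorem bWeave_get_odd (i : Nat) :
    ∀ (bs ts : List pvRoom), i < bs.length → i < ts.length → (bWeave bs ts)[2 * i + 1]? = ts[i]? := by
  induction i with
  | zero =>
    intro bs ts hb ht
    cases bs with
    | nil => simp at hb
    | cons b bs =>
      cases ts with
      | nil => simp at ht
      | cons t ts => rw [bWeave_cons_cons]; simp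
  | succ i ih =>
    intro bs ts hb ht
    cases bs with
    | nil => simp at hb
    | cons b bs =>
      cases ts with
      | nil => simp at ht
      | cons t ts =>
        rw [bWeave_cons_cons, show 2 * (i + 1) + 1 = 2 * i + 1 + 1 + 1 from by omega]
        simp only [List.getElem?_cons_succ]
        exact ih bs ts (by simpa using hb) (by simpa using ht)

theorem bWeave_get_bed_rest (ts : List pvRoom) :
    ∀ (bs : List pvRoom) (i : Nat), ts.length ≤ i → i < bs.length →
      (bWeave bs ts)[ts.length + i]? = bs[i]? := by
  induction ts with
  | nil => intro bs i _ _; rw [bWeave_nil_right]; simp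
  | cons t ts ih =>
    intro bs i hti hib
    cases bs with
    | nil => simp at hib
    | cons b bs =>
      cases i with
      | zero => simp at hti
      | succ i =>
        rw [bWeave_cons_cons,
          show (t :: ts).length + (i + 1) = ts.length + i + 1 + 1 from by
            simp only [List.length_cons]; omega]
        simp only [List.getElem?_cons_succ]
        exact ih bs i (by simpa using hti) (by simpa using hib)

theorem bWeave_get_bath_rest (bs : List pvRoom) :
    ∀ (ts : List pvRoom) (j : Nat), bs.length ≤ j → j < ts.length →
      (bWeave bs ts)[bs.length + j]? = ts[j]? := by
  induction bs with
  | nil => intro ts j _ _; rw [bWeave_nil]; simp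
  | cons b bs ih =>
    intro ts j hbj hjt
    cases ts with
    | nil => simp at hjt
    | cons t ts =>
      cases j with
      | zero => simp at hbj
      | succ j =>
        rw [bWeave_cons_cons,
          show (b :: bs).length + (j + 1) = bs.length + j + 1 + 1 from by
            simp only [List.length_cons]; omega]
        simp only [List.getElem?_cons_succ]
        exact ih ts j (by simpa using hbj) (by simpa using hjt)

-- every slot below rooms.length receives exactly the room Tgt puts there
theorem surj_placed (rooms : List pvRoom) (q : Nat) (hq : q < rooms.length) :
    ∃ v, (Tgt rooms)[q]? = some v ∧
      (q, v) ∈ placed (rooms.filter isM).length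
        ((rooms.filter isM).length + (rooms.filter isB).length)
        (rooms.filter isT).length
        (min ((rooms.filter isM).length + (rooms.filter isB).length) (rooms.filter isT).length)
        rooms 0 0 0 0 := by
  set fM := rooms.filter isM with hfM
  set fB := rooms.filter isB with hfB
  set fT := rooms.filter isT with hfT
  set fO := rooms.filter isO with hfO
  set nM := fM.length with hnM
  set nBd := fM.length + fB.length with hnBd
  set nBt := fT.length with hnBt
  set n := min nBd nBt with hn
  have hlen : rooms.length = nBd + nBt + fO.length := by
    rw [length_partition rooms]
  have hbl : (fM ++ fB).length = nBd := by simp [hnBd]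
  have hTw : (bWeave (fM ++ fB) fT).length = nBd + nBt := by
    rw [bWeave_length, hbl]
  have hbeds_get : ∀ i, i < nBd → ∃ v, (fM ++ fB)[i]? = some v ∧
      ((fM[i]? = some v ∧ i < nM) ∨ (fB[i - nM]? = some v ∧ nM ≤ i)) := by
    intro i hi
    by_cases him : i < nM
    · refine ⟨fM[i]'(him), ?_, Or.inl ⟨List.getElem?_eq_getElem him, him⟩⟩
      rw [List.getElem?_append_left (by simpa [hnM] using him)]
      exact List.getElem?_eq_getElem him
    · have hk : i - nM < fB.length := by omega
      refine ⟨fB[i - nM]'(hk), ?_, Or.inr ⟨List.getElem?_eq_getElem hk, by omega⟩⟩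
      rw [List.getElem?_append_right (by simpa [hnM] using him)]
      exact List.getElem?_eq_getElem (by simpa [hnM] using hk)
  have hmem_bed : ∀ i v, (fM ++ fB)[i]? = some v → i < nBd →
      ((if i < n then 2 * i else n + i), v) ∈ placed nM nBd nBt n rooms 0 0 0 0 := by
    intro i v hv hi
    obtain ⟨v', hv', hcase⟩ := hbeds_get i hi
    rw [hv] at hv'
    obtain rfl : v = v' := by injection hv'
    rcases hcase with ⟨hm, him⟩ | ⟨hb, him⟩
    · have h := mem_placed_master nM nBd nBt n rooms 0 0 0 0 i v hm
      simpa using h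
    · have h := mem_placed_bedroom nM nBd nBt n rooms 0 0 0 0 (i - nM) v hb
      simp only [Nat.zero_add] at h
      rw [show nM + (i - nM) = i from by omega] at h
      exact h
  by_cases hq1 : q < nBd + nBt
  · -- inside the weave
    have hTgt : (Tgt rooms)[q]? = (bWeave (fM ++ fB) fT)[q]? := by
      unfold Tgt
      rw [← hfM, ← hfB, ← hfT, ← hfO]
      rw [List.getElem?_append_left (by rw [hTw]; exact hq1)]
    by_cases hq2 : q < 2 * n
    · rcases Nat.even_or_odd q with ⟨i, hi⟩ | ⟨i, hi⟩
      · -- even slot 2i: bed i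
        have hq2i : q = 2 * i := by omega
        have hin : i < n := by omega
        have hibd : i < nBd := by omega
        have hibt : i < nBt := by omega
        obtain ⟨v, hv, _⟩ := hbeds_get i hibd
        refine ⟨v, ?_, ?_⟩
        · rw [hTgt, hq2i, bWeave_get_even i _ _ (by omega) (by omega), hv]
        · have h := hmem_bed i v hv hibd
          rw [if_pos hin] at h
          rw [hq2i]
          exact h
      · -- odd slot 2i+1: bath i
        have hq2i : q = 2 * i + 1 := by omega
        have hin : i < n := by omega
        have hit : i < fT.length := by omega
        refine ⟨fT[i]'(hit), ?_, ?_⟩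
        · rw [hTgt, hq2i, bWeave_get_odd i _ _ (by omega) (by omega)]
          exact List.getElem?_eq_getElem hit
        · have h := mem_placed_bath nM nBd nBt n rooms 0 0 0 0 i fT[i]
            (List.getElem?_eq_getElem hit)
          rw [hq2i]
          simpa [if_pos hin] using h
    · -- leftover region of the weave
      by_cases hcase : nBt ≤ nBd
      · -- leftover beds: n = nBt, slot = n + i
        have hnn : n = nBt := by omega
        have hi1 : n ≤ q - n := by omega
        have hi2 : q - n < nBd := by omega
        obtain ⟨v, hv, _⟩ := hbeds_get (q - n) hi2
        refine ⟨v, ?_, ?_⟩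
        · rw [hTgt, show q = fT.length + (q - n) from by omega,
            bWeave_get_bed_rest fT (fM ++ fB) (q - n) (by omega) (by omega), hv]
        · have h := hmem_bed (q - n) v hv hi2
          rw [if_neg (by omega)] at h
          simpa [show n + (q - n) = q from by omega] using h
      · -- leftover baths: n = nBd, slot = nBd + j
        have hnn : n = nBd := by omega
        have hj1 : n ≤ q - nBd := by omega
        have hj2 : q - nBd < fT.length := by omega
        obtain ⟨v, hv⟩ : ∃ v, fT[q - nBd]? = some v := ⟨_, List.getElem?_eq_getElem hj2⟩
        refine ⟨v, ?_, ?_⟩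
        · have hw := bWeave_get_bath_rest (fM ++ fB) fT (q - nBd) (by rw [hbl]; omega) (by omega)
          rw [hbl, show nBd + (q - nBd) = q from by omega] at hw
          rw [hTgt, hw, hv]
        · have h := mem_placed_bath nM nBd nBt n rooms 0 0 0 0 (q - nBd) v hv
          simp only [Nat.zero_add] at h
          rw [if_neg (by omega : ¬ q - nBd < n), show nBd + (q - nBd) = q from by omega] at h
          exact h
  · -- others region
    have hk : q - (nBd + nBt) < fO.length := by omega
    obtain ⟨v, hv⟩ : ∃ v, fO[q - (nBd + nBt)]? = some v := ⟨_, List.getElem?_eq_getElem hk⟩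
    refine ⟨v, ?_, ?_⟩
    · unfold Tgt
      rw [← hfM, ← hfB, ← hfT, ← hfO]
      rw [List.getElem?_append_right (by rw [hTw]; omega), hTw]
      exact hv
    · have h := mem_placed_other nM nBd nBt n rooms 0 0 0 0 (q - (nBd + nBt)) v hv
      simp only [Nat.zero_add] at h
      rw [show nBd + nBt + (q - (nBd + nBt)) = q from by omega] at h
      exact h

theorem Tgt_length (rooms : List pvRoom) : (Tgt rooms).length = rooms.length := by
  unfold Tgt
  rw [List.length_append, bWeave_length, length_partition rooms]
  simp only [List.length_append]

-- the placed pairs are a permutation of (slot, room-at-that-slot); the slots are distinct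
theorem placed_perm (rooms : List pvRoom) :
    (placed (rooms.filter isM).length
        ((rooms.filter isM).length + (rooms.filter isB).length)
        (rooms.filter isT).length
        (min ((rooms.filter isM).length + (rooms.filter isB).length) (rooms.filter isT).length)
        rooms 0 0 0 0).Perm
      ((List.range rooms.length).map (fun q => (q, ((Tgt rooms)[q]?).getD []))) := by
  have hnd : ((List.range rooms.length).map (fun q => (q, ((Tgt rooms)[q]?).getD []))).Nodup := by
    refine (List.nodup_map_iff_inj_on List.nodup_range).mpr ?_
    intro x _ y _ hxy
    exact congrArg Prod.fst hxy
  have hsub : ((List.range rooms.length).map (fun q => (q, ((Tgt rooms)[q]?).getD []))) ⊆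
      placed (rooms.filter isM).length
        ((rooms.filter isM).length + (rooms.filter isB).length)
        (rooms.filter isT).length
        (min ((rooms.filter isM).length + (rooms.filter isB).length) (rooms.filter isT).length)
        rooms 0 0 0 0 := by
    intro p hp
    rw [List.mem_map] at hp
    obtain ⟨q, hq, rfl⟩ := hp
    rw [List.mem_range] at hq
    obtain ⟨v, hv1, hv2⟩ := surj_placed rooms q hq
    rw [hv1]
    exact hv2
  have hle : (placed (rooms.filter isM).length
        ((rooms.filter isM).length + (rooms.filter isB).length)
        (rooms.filter isT).length
        (min ((rooms.filter isM).length + (rooms.filter isB).length) (rooms.filter isT).length)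
        rooms 0 0 0 0).length ≤
      ((List.range rooms.length).map (fun q => (q, ((Tgt rooms)[q]?).getD []))).length := by
    rw [List.length_map, List.length_range, placed_length]
  exact ((List.subperm_of_subset hnd hsub).perm_of_length_le hle).symm

-- B's port equals the target arrangement
theorem portB_eq_tgt (rooms : List pvRoom) : interleave_beds_baths_py_alt rooms = Tgt rooms := by
  unfold interleave_beds_baths_py_alt
  simp only [List.countP_eq_length_filter, isM_def, isB_def, isT_def]
  rw [fold_eq_scatter]
  have hperm := placed_perm rooms
  have hnd : ((placed (rooms.filter isM).length
      ((rooms.filter isM).length + (rooms.filter isB).length)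
      (rooms.filter isT).length
      (min ((rooms.filter isM).length + (rooms.filter isB).length) (rooms.filter isT).length)
      rooms 0 0 0 0).map Prod.fst).Nodup := by
    rw [(hperm.map Prod.fst).nodup_iff]
    simp only [List.map_map]
    have he : (Prod.fst ∘ fun q : Nat => (q, ((Tgt rooms)[q]?).getD ([] : pvRoom))) = id := by
      funext q; rfl
    rw [he, List.map_id]
    exact List.nodup_range
  apply List.ext_getElem?
  intro q
  rw [List.getElem?_map]
  by_cases hq : q < rooms.length
  · obtain ⟨v, hv1, hv2⟩ := surj_placed rooms q hq
    rw [scatter_get_mem _ q v _ hv2 hnd (by simpa using hq), hv1]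
    rfl
  · have h1 : (Tgt rooms)[q]? = none :=
      List.getElem?_eq_none (by rw [Tgt_length]; omega)
    have h2 : (scatter (placed (rooms.filter isM).length
        ((rooms.filter isM).length + (rooms.filter isB).length)
        (rooms.filter isT).length
        (min ((rooms.filter isM).length + (rooms.filter isB).length) (rooms.filter isT).length)
        rooms 0 0 0 0) (List.replicate rooms.length none))[q]? = none :=
      List.getElem?_eq_none (by rw [scatter_length]; simpa using Nat.le_of_not_lt hq)
    rw [h1, h2]
    rfl

-- ===== VERDICT (by name: the statement is the Claim_ definition above) =====
theorem interleave_beds_baths_py_spec : Claim_equal_interleave_beds_baths_py := by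
  intro rooms _ _
  unfold Spec_interleave_beds_baths_py
  rw [portA_eq_weave, portB_eq_tgt]
  rfl
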